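-- pv_equiv track=rewrite | github.com/alexeybutyrev/leetcode-solutions | solutions/3694. Distinct Points Reachable After Substring Removal/solution.py | distinctPoints
-- ===== SOURCE A (Python) =====
-- def distinctPoints(S: str, K: int) -> int:
--     N = len(S)
--
--
--     T = S
--
--     curr = [0,0]
--     for i,x in enumerate(T):
--         if x == 'U': curr[0],curr[1] = curr[0],    curr[1]+1
--         if x == 'D': curr[0],curr[1] = curr[0],    curr[1]-1
--         if x == 'L': curr[0],curr[1] = curr[0]-1,  curr[1]
--         if x == 'R': curr[0],curr[1] = curr[0]+1,  curr[1]
--     s = set()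
--     c = N-1
--     for j in range(K):
--         x = T[c - j]
--         if x == 'U': curr[0],curr[1] = curr[0],    curr[1]-1
--         if x == 'D': curr[0],curr[1] = curr[0],    curr[1]+1
--         if x == 'L': curr[0],curr[1] = curr[0]+1,  curr[1]
--         if x == 'R': curr[0],curr[1] = curr[0]-1,  curr[1]
--     s.add((curr[0],curr[1]))
--     for i in range(N-1,-1,-1):
--         j = i - K
--         if j >= 0:
--             x = T[j]
--             if x == 'U': curr[0],curr[1] = curr[0],    curr[1]-1
--             if x == 'D': curr[0],curr[1] = curr[0],    curr[1]+1
--             if x == 'L': curr[0],curr[1] = curr[0]+1,  curr[1]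
--             if x == 'R': curr[0],curr[1] = curr[0]-1,  curr[1]
--             x = T[i]
--             if x == 'U': curr[0],curr[1] = curr[0],    curr[1]+1
--             if x == 'D': curr[0],curr[1] = curr[0],    curr[1]-1
--             if x == 'L': curr[0],curr[1] = curr[0]-1,  curr[1]
--             if x == 'R': curr[0],curr[1] = curr[0]+1,  curr[1]
--
--             s.add((curr[0],curr[1]))
--         else:
--             break
--     return len(s)
-- ===== SOURCE B (Python) =====
-- def distinctPoints(S: str, K: int) -> int:
--     px = [0]
--     py = [0]
--     x = y = 0
--     for ch in S:
--         if ch == 'U':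
--             y += 1
--         elif ch == 'D':
--             y -= 1
--         elif ch == 'L':
--             x -= 1
--         elif ch == 'R':
--             x += 1
--         px.append(x)
--         py.append(y)
--     N = len(S)
--     tx, ty = px[N], py[N]
--     pts = set()
--     for j in range(N - K + 1):
--         pts.add((tx - (px[j + K] - px[j]), ty - (py[j + K] - py[j])))
--     return len(pts)
-- ===== Notes on version B (the rewrite author's own statement) =====
-- stated objective: simpler
-- what changed: B precomputes prefix-sum displacement tables once and adds a closed formula per window start into a set, replacing A's three sequential loops that incrementally slide a running cursor (build total, undo suffix, then per-step undo/redo).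
-- intended difference: For len(S) < K <= 2*len(S) A returns 1 because Python negative indexing silently wraps in its suffix-undo loop, while B returns 0 since no length-K substring exists to remove, which is the intended count of reachable endpoints. — e.g. on distinctPoints("U", 2): A returns 1, B returns 0
-- outside the precondition, e.g. on distinctPoints('', -1): A returns 1, B raises IndexError
import Mathlib
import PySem

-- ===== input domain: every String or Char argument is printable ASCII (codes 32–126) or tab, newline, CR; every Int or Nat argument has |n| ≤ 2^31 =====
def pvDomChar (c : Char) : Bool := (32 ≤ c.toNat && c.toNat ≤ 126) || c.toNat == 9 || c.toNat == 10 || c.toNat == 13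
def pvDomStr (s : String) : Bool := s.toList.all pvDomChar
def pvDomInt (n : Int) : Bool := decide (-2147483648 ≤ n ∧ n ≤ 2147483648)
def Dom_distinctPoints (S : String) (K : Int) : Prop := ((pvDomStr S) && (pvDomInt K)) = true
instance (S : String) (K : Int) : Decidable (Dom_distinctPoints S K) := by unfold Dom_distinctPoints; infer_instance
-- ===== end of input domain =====

-- B replaces A's three incremental-cursor loops by prefix-sum tables and a per-window formula (same O(n) cost,
-- plainer structure); on len(S) < K ≤ 2·len(S), where A's negative indexing wraps, A returns 1 and B returns 0 (see D_).

-- ===== PORT A =====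
-- one forward step of A's first loop (Python's four sequential `if`s, kept sequential)
def pvStepF (x : Char) (p : Int × Int) : Int × Int :=
  let p := if x = 'U' then (p.1, p.2 + 1) else p
  let p := if x = 'D' then (p.1, p.2 - 1) else p
  let p := if x = 'L' then (p.1 - 1, p.2) else p
  let p := if x = 'R' then (p.1 + 1, p.2) else p
  p

-- one reverse (undo) step of A's second/third loop
def pvStepR (x : Char) (p : Int × Int) : Int × Int :=
  let p := if x = 'U' then (p.1, p.2 - 1) else p
  let p := if x = 'D' then (p.1, p.2 + 1) else p
  let p := if x = 'L' then (p.1 + 1, p.2) else p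
  let p := if x = 'R' then (p.1 - 1, p.2) else p
  p

-- A's third loop: `for i in range(N-1,-1,-1)` with `break` once j = i-K < 0; recursion over the descending i
def pvLoopA (T : List Char) (K : Int) : Nat → Int × Int → PySem.Set (Int × Int) → PySem.Set (Int × Int)
  | 0, curr, s =>
      if (0 : Int) - K ≥ 0 then
        let curr := pvStepR (PySem.List.pyGetD T ((0 : Int) - K) ' ') curr
        let curr := pvStepF (PySem.List.pyGetD T (0 : Int) ' ') curr
        PySem.Set.add s curr
      else s
  | n + 1, curr, s =>
      if ((n : Int) + 1) - K ≥ 0 then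
        let curr := pvStepR (PySem.List.pyGetD T (((n : Int) + 1) - K) ' ') curr
        let curr := pvStepF (PySem.List.pyGetD T ((n : Int) + 1) ' ') curr
        pvLoopA T K n curr (PySem.Set.add s curr)
      else s

def distinctPoints (S : String) (K : Int) : Int :=
  let T := S.toList
  let N : Int := PySem.List.len T
  let curr := T.foldl (fun p x => pvStepF x p) (0, 0)
  let c := N - 1
  let curr := (PySem.List.pyRange 0 K 1).foldl
    (fun p j =>
      match PySem.List.pyGet? T (c - j) with
      | some x => pvStepR x p
      | none => p)   -- none = Python IndexError; such inputs are outside Pre_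
    curr
  let s : PySem.Set (Int × Int) := PySem.Set.add PySem.Set.empty curr
  match T.length with
  | 0 => PySem.Set.len s
  | n + 1 => PySem.Set.len (pvLoopA T K n curr s)

-- ===== PORT B =====
-- B's single pass: build prefix-displacement tables px, py while tracking (x, y)
def pvBuild (T : List Char) : (List Int × List Int) × (Int × Int) :=
  T.foldl
    (fun st ch =>
      let x := st.2.1
      let y := st.2.2
      let xy : Int × Int :=
        if ch = 'U' then (x, y + 1)
        else if ch = 'D' then (x, y - 1)
        else if ch = 'L' then (x - 1, y)
        else if ch = 'R' then (x + 1, y)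
        else (x, y)
      ((st.1.1 ++ [xy.1], st.1.2 ++ [xy.2]), xy))
    (([0], [0]), (0, 0))

def distinctPoints_alt (S : String) (K : Int) : Int :=
  let T := S.toList
  let st := pvBuild T
  let px := st.1.1
  let py := st.1.2
  let N : Int := PySem.List.len T
  let tx := PySem.List.pyGetD px N 0
  let ty := PySem.List.pyGetD py N 0
  let pts := (PySem.List.pyRange 0 (N - K + 1) 1).foldl
    (fun s j =>
      PySem.Set.add s
        (tx - (PySem.List.pyGetD px (j + K) 0 - PySem.List.pyGetD px j 0),
         ty - (PySem.List.pyGetD py (j + K) 0 - PySem.List.pyGetD py j 0)))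
    PySem.Set.empty
  PySem.Set.len pts

-- ===== PRECONDITION & SPEC =====
-- Pre_ excludes negative K (A raises IndexError on every nonempty S; on the empty S A's accidental 1 is unmatchable
-- because B's own prefix-table indexing raises there) and K > 2·len(S) (A raises IndexError; see Raises_ below).
def Pre_distinctPoints (S : String) (K : Int) : Prop :=
  0 ≤ K ∧ K ≤ 2 * PySem.Str.len S
instance (S : String) (K : Int) : Decidable (Pre_distinctPoints S K) := by
  unfold Pre_distinctPoints; infer_instance

def pvWitness_distinctPoints : String × Int := ("UDLR", 2)

-- For len(S) < K ≤ 2·len(S) A returns 1 (its suffix-undo loop silently wraps through negative indices), while B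
-- returns 0 because no length-K substring exists to remove — the intended count of reachable endpoints.
def D_distinctPoints (S : String) (K : Int) : Prop := PySem.Str.len S < K
instance (S : String) (K : Int) : Decidable (D_distinctPoints S K) := by
  unfold D_distinctPoints; infer_instance

def Spec_distinctPoints (S : String) (K : Int) (out : Int) : Prop :=
  ¬ D_distinctPoints S K → out = distinctPoints_alt S K
instance (S : String) (K : Int) (out : Int) : Decidable (Spec_distinctPoints S K out) := by
  unfold Spec_distinctPoints; infer_instance

def pvDiffWitness_distinctPoints : String × Int := ("U", 2)
def pvDiffWitnessOut_distinctPoints : Int × Int := (1, 0)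

-- ===== CLAIM (what is proved, stated in full; the proofs are below) =====
def Claim_unchanged_distinctPoints : Prop := ∀ (S : String) (K : Int), Dom_distinctPoints S K → Pre_distinctPoints S K → Spec_distinctPoints S K (distinctPoints S K)
def Claim_changed_distinctPoints : Prop := Dom_distinctPoints (pvDiffWitness_distinctPoints.1) (pvDiffWitness_distinctPoints.2) ∧ Pre_distinctPoints (pvDiffWitness_distinctPoints.1) (pvDiffWitness_distinctPoints.2) ∧ D_distinctPoints (pvDiffWitness_distinctPoints.1) (pvDiffWitness_distinctPoints.2) ∧ distinctPoints (pvDiffWitness_distinctPoints.1) (pvDiffWitness_distinctPoints.2) = pvDiffWitnessOut_distinctPoints.1 ∧ distinctPoints_alt (pvDiffWitness_distinctPoints.1) (pvDiffWitness_distinctPoints.2) = pvDiffWitnessOut_distinctPoints.2 ∧ pvDiffWitnessOut_distinctPoints.1 ≠ pvDiffWitnessOut_distinctPoints.2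
def Claim_exact_distinctPoints : Prop := ∀ (S : String) (K : Int), Dom_distinctPoints S K → Pre_distinctPoints S K → D_distinctPoints S K → distinctPoints S K ≠ distinctPoints_alt S K

-- ===== LEMMAS AND PROOFS =====

-- per-character displacement and prefix sums
def pvDx (c : Char) : Int := if c = 'L' then -1 else if c = 'R' then 1 else 0
def pvDy (c : Char) : Int := if c = 'U' then 1 else if c = 'D' then -1 else 0
def pvPX (T : List Char) (j : Nat) : Int := ((T.take j).map pvDx).sum
def pvPY (T : List Char) (j : Nat) : Int := ((T.take j).map pvDy).sum
-- endpoint after removing the window [j, j+k)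
def pvE (T : List Char) (k : Nat) (j : Nat) : Int × Int :=
  (pvPX T T.length - (pvPX T (j + k) - pvPX T j),
   pvPY T T.length - (pvPY T (j + k) - pvPY T j))

theorem pvStepF_eq (x : Char) (p : Int × Int) : pvStepF x p = (p.1 + pvDx x, p.2 + pvDy x) := by
  simp only [pvStepF, pvDx, pvDy]
  split_ifs <;> simp_all <;> try omega

theorem pvStepR_eq (x : Char) (p : Int × Int) : pvStepR x p = (p.1 - pvDx x, p.2 - pvDy x) := by
  simp only [pvStepR, pvDx, pvDy]
  split_ifs <;> simp_all

theorem pvPX_succ (T : List Char) (j : Nat) (h : j < T.length) :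
    pvPX T (j + 1) = pvPX T j + pvDx T[j] := by
  unfold pvPX
  rw [List.take_succ_eq_append_getElem h, List.map_append, List.sum_append]
  simp

theorem pvPY_succ (T : List Char) (j : Nat) (h : j < T.length) :
    pvPY T (j + 1) = pvPY T j + pvDy T[j] := by
  unfold pvPY
  rw [List.take_succ_eq_append_getElem h, List.map_append, List.sum_append]
  simp

theorem pvPX_len (T : List Char) : pvPX T T.length = (T.map pvDx).sum := by simp [pvPX]

theorem pvPY_len (T : List Char) : pvPY T T.length = (T.map pvDy).sum := by simp [pvPY]

theorem pvLoop1 (T : List Char) (p : Int × Int) :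
    T.foldl (fun p x => pvStepF x p) p = (p.1 + pvPX T T.length, p.2 + pvPY T T.length) := by
  rw [pvPX_len, pvPY_len]
  induction T generalizing p with
  | nil => simp
  | cons c t ih =>
    rw [List.foldl_cons, ih, pvStepF_eq]
    simp; constructor <;> ring

theorem pvLoop2 (T : List Char) (k : Nat) (hk : k ≤ T.length) :
    (PySem.List.pyRange 0 (k : Int) 1).foldl
      (fun p j =>
        match PySem.List.pyGet? T (((T.length : Int) - 1) - j) with
        | some x => pvStepR x p
        | none => p)
      (pvPX T T.length, pvPY T T.length)
    = (pvPX T (T.length - k), pvPY T (T.length - k)) := by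
  induction k with
  | zero => simp [PySem.List.pyRange_one_eq_nil]
  | succ m ih =>
    have h1 : ((m + 1 : Nat) : Int) = (m : Int) + 1 := by omega
    rw [h1, PySem.List.pyRange_one_succ_right (by positivity), List.foldl_append,
        ih (by omega)]
    have hidx : ((T.length : Int) - 1) - (m : Int) = ((T.length - 1 - m : Nat) : Int) := by
      omega
    simp only [List.foldl_cons, List.foldl_nil, hidx, PySem.List.pyGet?_natCast]
    have hlt : T.length - 1 - m < T.length := by omega
    have hsub : T.length - m = (T.length - 1 - m) + 1 := by omega
    simp only [List.getElem?_eq_getElem hlt, pvStepR_eq]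
    rw [hsub, pvPX_succ T _ hlt, pvPY_succ T _ hlt,
        show T.length - (m + 1) = T.length - 1 - m from by omega]
    exact Prod.ext (by ring) (by ring)

theorem pvE_step (T : List Char) (k n : Nat) (hk : k ≤ n) (hn : n < T.length) :
    pvStepF T[n] (pvStepR T[n - k] (pvE T k (n + 1 - k))) = pvE T k (n - k) := by
  rw [pvStepR_eq, pvStepF_eq]
  unfold pvE
  have h1 : n + 1 - k = (n - k) + 1 := by omega
  have h2 : (n - k) + 1 + k = n + 1 := by omega
  have h3 : n - k + k = n := by omega
  have hlt : n - k < T.length := by omega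
  rw [h1, h2, h3, pvPX_succ T n hn, pvPY_succ T n hn, pvPX_succ T (n-k) hlt, pvPY_succ T (n-k) hlt]
  exact Prod.ext (by dsimp; ring) (by dsimp; ring)

theorem pvLoopA_eq (T : List Char) (k : Nat) (n : Nat) (hn : n < T.length) :
    ∀ s : PySem.Set (Int × Int), k ≤ n + 1 →
      pvLoopA T (k : Int) n (pvE T k (n + 1 - k)) s
      = (((List.range (n + 1 - k)).reverse).map (pvE T k)).foldl PySem.Set.add s := by
  induction n with
  | zero =>
    intro s hk
    unfold pvLoopA
    by_cases h : k = 0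
    · subst h
      rw [if_pos (by omega)]
      have g0 : PySem.List.pyGetD T ((0:Int) - ((0:Nat):Int)) ' ' = T[0] := by
        rw [show (0:Int) - ((0:Nat):Int) = ((0:Nat):Int) from by omega, PySem.List.pyGetD_natCast]
        simp [List.getD, List.getElem?_eq_getElem hn]
      have g1 : PySem.List.pyGetD T (0:Int) ' ' = T[0] := by
        rw [show (0:Int) = ((0:Nat):Int) from rfl, PySem.List.pyGetD_natCast]
        simp [List.getD, List.getElem?_eq_getElem hn]
      rw [g0, g1]
      have := pvE_step T 0 0 (le_refl 0) hn
      simp only [Nat.sub_zero] at this ⊢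
      rw [this]
      simp [List.range_succ]
    · have hk1 : k = 1 := by omega
      subst hk1
      rw [if_neg (by omega)]
      simp
  | succ m ih =>
    intro s hk
    unfold pvLoopA
    by_cases h : k ≤ m + 1
    · rw [if_pos (by omega)]
      have hj : ((m : Int) + 1) - (k : Int) = ((m + 1 - k : Nat) : Int) := by omega
      have hjlt : m + 1 - k < T.length := by omega
      have gi : PySem.List.pyGetD T (((m : Int) + 1) - (k : Int)) ' ' = T[m + 1 - k] := by
        rw [hj, PySem.List.pyGetD_natCast]
        simp [List.getD, List.getElem?_eq_getElem hjlt]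
      have gii : PySem.List.pyGetD T ((m : Int) + 1) ' ' = T[m + 1] := by
        rw [show (m : Int) + 1 = ((m + 1 : Nat) : Int) from by push_cast; ring, PySem.List.pyGetD_natCast]
        simp [List.getD, List.getElem?_eq_getElem hn]
      rw [gi, gii]
      have hstep := pvE_step T k (m + 1) h hn
      rw [show m + 1 + 1 - k = m + 1 - k + 1 from by omega] at hstep ⊢
      simp only [hstep]
      rw [ih (by omega) (s.add (pvE T k (m + 1 - k))) h, List.range_succ, List.reverse_append]
      simp
    · rw [if_neg (by omega)]
      rw [show m + 1 + 1 - k = 0 from by omega]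
      simp

theorem pvBStep_eq (ch : Char) (x y : Int) :
    (if ch = 'U' then (x, y + 1)
     else if ch = 'D' then (x, y - 1)
     else if ch = 'L' then (x - 1, y)
     else if ch = 'R' then (x + 1, y)
     else (x, y)) = (x + pvDx ch, y + pvDy ch) := by
  simp only [pvDx, pvDy]
  split_ifs <;> simp_all <;> try omega

theorem pvPX_take (T : List Char) (c : Char) (j : Nat) (h : j ≤ T.length) :
    pvPX (T ++ [c]) j = pvPX T j := by
  unfold pvPX; rw [List.take_append_of_le_length h]

theorem pvPY_take (T : List Char) (c : Char) (j : Nat) (h : j ≤ T.length) :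
    pvPY (T ++ [c]) j = pvPY T j := by
  unfold pvPY; rw [List.take_append_of_le_length h]

theorem pvBuild_eq (T : List Char) :
    pvBuild T = (((List.range (T.length + 1)).map (pvPX T),
                  (List.range (T.length + 1)).map (pvPY T)),
                 (pvPX T T.length, pvPY T T.length)) := by
  induction T using List.reverseRecOn with
  | nil => simp [pvBuild, pvPX, pvPY]
  | append_singleton t c ih =>
    unfold pvBuild at ih ⊢
    rw [List.foldl_append, ih, List.foldl_cons, List.foldl_nil]
    simp only [pvBStep_eq]
    have hlen : (t ++ [c]).length = t.length + 1 := by simp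
    have hlast : pvPX (t ++ [c]) (t.length + 1) = pvPX t t.length + pvDx c ∧
                 pvPY (t ++ [c]) (t.length + 1) = pvPY t t.length + pvDy c := by
      constructor
      · rw [pvPX_succ (t ++ [c]) t.length (by simp)]
        simp [pvPX_take t c t.length (le_refl _)]
      · rw [pvPY_succ (t ++ [c]) t.length (by simp)]
        simp [pvPY_take t c t.length (le_refl _)]
    refine Prod.ext (Prod.ext ?_ ?_) (Prod.ext ?_ ?_) <;> dsimp
    · rw [hlen, List.range_succ (n := t.length + 1), List.map_append]
      congr 1
      · apply List.map_congr_left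
        intro j hj
        exact (pvPX_take t c j (by simp at hj; omega)).symm
      · simp [hlast.1]
    · rw [hlen, List.range_succ (n := t.length + 1), List.map_append]
      congr 1
      · apply List.map_congr_left
        intro j hj
        exact (pvPY_take t c j (by simp at hj; omega)).symm
      · simp [hlast.2]
    · rw [hlen, hlast.1]
    · rw [hlen, hlast.2]

theorem pvLen_ofList_reverse {α : Type} [BEq α] [LawfulBEq α] (l : List α) :
    (PySem.Set.ofList l.reverse).length = (PySem.Set.ofList l).length := by
  have h1 : (PySem.Set.ofList l.reverse).Perm (PySem.Set.ofList l) := by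
    rw [List.perm_ext_iff_of_nodup (PySem.Set.nodup_ofList _) (PySem.Set.nodup_ofList _)]
    intro x
    simp [PySem.Set.mem_ofList]
  exact h1.length_eq

theorem pvE_top (T : List Char) (k : Nat) (hk : k ≤ T.length) :
    pvE T k (T.length - k) = (pvPX T (T.length - k), pvPY T (T.length - k)) := by
  unfold pvE
  rw [show T.length - k + k = T.length from by omega]
  exact Prod.ext (by dsimp; ring) (by dsimp; ring)

theorem pvA_closed (S : String) (k : Nat) (hk : k ≤ S.toList.length) :
    distinctPoints S (k : Int)
    = PySem.Set.len (PySem.Set.ofList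
        (((List.range (S.toList.length - k + 1)).map (pvE S.toList k)).reverse)) := by
  unfold distinctPoints
  simp only [PySem.List.len_eq]
  set T := S.toList with hT
  rw [pvLoop1]
  have h2 := pvLoop2 T k hk
  simp only [zero_add]
  rw [h2, pvE_top T k hk |>.symm]
  cases hN : T.length with
  | zero =>
    have hk0 : k = 0 := by omega
    subst hk0
    rfl
  | succ n =>
    show (pvLoopA T (k : Int) n (pvE T k (n + 1 - k))
            (PySem.Set.add PySem.Set.empty (pvE T k (n + 1 - k)))).len = _
    rw [pvLoopA_eq T k n (by omega) _ (by omega)]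
    rw [List.range_succ, List.map_append, List.reverse_append, ← List.map_reverse,
        PySem.Set.ofList_eq_foldl]
    simp [List.map_reverse]

theorem pvB_closed (S : String) (k : Nat) (hk : k ≤ S.toList.length) :
    distinctPoints_alt S (k : Int)
    = PySem.Set.len (PySem.Set.ofList
        ((List.range (S.toList.length - k + 1)).map (pvE S.toList k))) := by
  unfold distinctPoints_alt
  simp only [PySem.List.len_eq]
  set T := S.toList with hT
  rw [pvBuild_eq]
  dsimp only
  have htx : PySem.List.pyGetD ((List.range (T.length + 1)).map (pvPX T)) ((T.length : Nat) : Int) 0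
      = pvPX T T.length := by
    rw [PySem.List.pyGetD_natCast]
    simp [List.getD]
  have hty : PySem.List.pyGetD ((List.range (T.length + 1)).map (pvPY T)) ((T.length : Nat) : Int) 0
      = pvPY T T.length := by
    rw [PySem.List.pyGetD_natCast]
    simp [List.getD]
  rw [htx, hty]
  have hr : ((T.length : Int) - (k : Int) + 1) = ((T.length - k + 1 : Nat) : Int) := by
    omega
  rw [hr, PySem.List.pyRange_one]
  simp only [sub_zero, Int.toNat_natCast]
  rw [List.foldl_map]
  have hcong : ∀ jn ∈ List.range (T.length - k + 1), ∀ s : PySem.Set (Int × Int),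
      PySem.Set.add s
        (pvPX T T.length -
           (PySem.List.pyGetD ((List.range (T.length + 1)).map (pvPX T)) ((0 : Int) + (jn : Int) + (k : Int)) 0 -
            PySem.List.pyGetD ((List.range (T.length + 1)).map (pvPX T)) ((0 : Int) + (jn : Int)) 0),
         pvPY T T.length -
           (PySem.List.pyGetD ((List.range (T.length + 1)).map (pvPY T)) ((0 : Int) + (jn : Int) + (k : Int)) 0 -
            PySem.List.pyGetD ((List.range (T.length + 1)).map (pvPY T)) ((0 : Int) + (jn : Int)) 0))
      = PySem.Set.add s (pvE T k jn) := by
    intro jn hjn s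
    rw [List.mem_range] at hjn
    have e1 : (0 : Int) + (jn : Int) + (k : Int) = ((jn + k : Nat) : Int) := by omega
    have e2 : (0 : Int) + (jn : Int) = ((jn : Nat) : Int) := by omega
    rw [e1, e2, PySem.List.pyGetD_natCast, PySem.List.pyGetD_natCast,
        PySem.List.pyGetD_natCast, PySem.List.pyGetD_natCast]
    have g : ∀ (f : Nat → Int) (j : Nat), j < T.length + 1 →
        ((List.range (T.length + 1)).map f).getD j 0 = f j := by
      intro f j hj
      simp [List.getD, List.getElem?_map, List.getElem?_range hj]
    rw [g _ _ (by omega), g _ _ (by omega), g _ _ (by omega), g _ _ (by omega)]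
    rfl
  congr 1
  rw [PySem.List.foldl_congr_mem _ _ _ _ (fun s jn hjn => hcong jn hjn s),
      ← PySem.Set.update_map_eq_foldl_add, PySem.Set.update_empty]

theorem pvMain (S : String) (k : Nat) (hk : (k : Int) ≤ PySem.Str.len S) :
    distinctPoints S (k : Int) = distinctPoints_alt S (k : Int) := by
  have hk' : k ≤ S.toList.length := by
    have := PySem.Str.len_eq S
    omega
  rw [pvA_closed S k hk', pvB_closed S k hk']
  unfold PySem.Set.len
  rw [pvLen_ofList_reverse]

theorem pvLoopA_stop (T : List Char) (K : Int) (n : Nat) (curr : Int × Int)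
    (s : PySem.Set (Int × Int)) (h : (n : Int) < K) : pvLoopA T K n curr s = s := by
  cases n with
  | zero => exact if_neg (by omega)
  | succ m =>
    unfold pvLoopA
    rw [if_neg (by push_cast at h ⊢; omega)]

theorem pvTight (S : String) (K : Int) (_h0 : 0 ≤ K) (h2 : K ≤ 2 * PySem.Str.len S)
    (hD : PySem.Str.len S < K) : distinctPoints S K ≠ distinctPoints_alt S K := by
  have hlen := PySem.Str.len_eq S
  have hN : 1 ≤ S.toList.length := by omega
  have hA : distinctPoints S K = 1 := by
    unfold distinctPoints
    simp only [PySem.List.len_eq]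
    cases hc : S.toList.length with
    | zero => omega
    | succ n =>
      dsimp only
      rw [pvLoopA_stop _ _ _ _ _ (by omega)]
      rw [PySem.Set.add_of_not_mem (by simp [PySem.Set.empty])]
      rfl
  have hB : distinctPoints_alt S K = 0 := by
    unfold distinctPoints_alt
    simp only [PySem.List.len_eq]
    rw [PySem.List.pyRange_one_eq_nil (by omega)]
    rfl
  rw [hA, hB]
  omega

-- ===== VERDICT (by name: the statement is the Claim_ definition above) =====
theorem distinctPoints_spec : Claim_unchanged_distinctPoints := by
  intro S K _ hPre hD
  obtain ⟨h0, -⟩ := hPre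
  unfold D_distinctPoints at hD
  lift K to ℕ using h0 with k
  exact pvMain S k (by omega)

theorem distinctPoints_changed : Claim_changed_distinctPoints := by
  unfold Claim_changed_distinctPoints; decide

theorem distinctPoints_tight : Claim_exact_distinctPoints := by
  intro S K _ hPre hD
  unfold D_distinctPoints at hD
  exact pvTight S K hPre.1 hPre.2 hD
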